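-- pv_equiv track=rewrite | github.com/jacquesgautrais/covariants | scripts/convert_to_web_app_json.py | diff_left_closed
-- ===== SOURCE A (Python) =====
-- def diff_left_closed(big, small, closed=False):
--     """
--     Calculates a difference between a larger list and a smaller list.
--     Boundaries are included into the diff. The difference is sorted.
--     """
--     diff = set()
--     N = len(big)
--     for i, curr in enumerate(big):
--         if curr not in small:
--             diff.add(curr)  # Add current
--
--             if closed:
--                 if i > 0:
--                     # Add previous
--                     prev = big[i - 1]
--                     diff.add(prev)
--                 if i < (N - 1):
--                     # Add next
--                     next_ = big[i + 1]
--                     diff.add(next_)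
--
--     return sorted(list(diff))
-- ===== SOURCE B (Python) =====
-- def diff_left_closed(big, small, closed=False):
--     """Pull formulation: index j is kept iff some index in its (clamped) window
--     [j-1, j+1] (just {j} when not closed) holds a value outside small."""
--     N = len(big)
--     if closed:
--         kept = lambda j: any(big[i] not in small for i in range(max(j - 1, 0), min(j + 2, N)))
--     else:
--         kept = lambda j: big[j] not in small
--     return sorted({big[j] for j in range(N) if kept(j)})
-- ===== Notes on version B (the rewrite author's own statement) =====
-- stated objective: alternative
-- what changed: B replaces A's push-style set accumulation (insert each kept value and, when closed, push its neighbors into a growing set) by a pull-style predicate: for each index j it directly tests whether some index in the clamped window [j-1, j+1] holds a value outside small, and sorts the deduplicated selected values; no set is maintained during the scan.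
import Mathlib
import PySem

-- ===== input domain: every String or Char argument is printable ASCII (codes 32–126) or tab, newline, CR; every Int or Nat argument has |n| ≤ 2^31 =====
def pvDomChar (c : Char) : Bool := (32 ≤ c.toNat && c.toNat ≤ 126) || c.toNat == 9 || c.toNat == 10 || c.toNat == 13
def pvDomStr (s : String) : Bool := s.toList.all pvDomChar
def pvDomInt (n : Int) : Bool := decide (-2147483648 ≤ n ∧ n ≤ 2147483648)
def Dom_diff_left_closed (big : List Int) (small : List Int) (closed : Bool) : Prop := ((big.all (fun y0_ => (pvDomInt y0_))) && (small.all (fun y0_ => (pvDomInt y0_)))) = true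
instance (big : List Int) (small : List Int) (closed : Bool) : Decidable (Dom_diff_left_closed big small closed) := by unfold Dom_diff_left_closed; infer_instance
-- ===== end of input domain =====

-- B replaces A's push-style set accumulation by a pull-style per-index window predicate;
-- same cost, a genuinely different algorithmic decomposition (objective: alternative).

-- ===== PORT A =====
-- loop body of A's for-loop over enumerate(big)
def pvStepA (big small : List Int) (closed : Bool) (N : Int) (diff : PySem.Set Int) (p : Int × Int) : PySem.Set Int :=
  if ¬ p.2 ∈ small then
    let diff := PySem.Set.add diff p.2
    if closed then
      let diff := if p.1 > 0 then PySem.Set.add diff (PySem.List.pyGetD big (p.1 - 1) 0) else diff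
      if p.1 < N - 1 then PySem.Set.add diff (PySem.List.pyGetD big (p.1 + 1) 0) else diff
    else diff
  else diff

def diff_left_closed (big : List Int) (small : List Int) (closed : Bool) : List Int :=
  let N : Int := big.length
  let diff : PySem.Set Int := (PySem.List.enumerate big).foldl (pvStepA big small closed N) []
  PySem.List.sorted diff (fun x => x) false

-- ===== PORT B =====
-- B's per-index predicate: when closed, any index of the clamped window [j-1, j+1] holds a
-- value outside small; otherwise just big[j] not in small
def pvKeptB (big small : List Int) (closed : Bool) (N : Int) (j : Int) : Bool :=
  if closed then
    (PySem.List.pyRange (max (j - 1) 0) (min (j + 2) N) 1).any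
      (fun i => decide (¬ PySem.List.pyGetD big i 0 ∈ small))
  else decide (¬ PySem.List.pyGetD big j 0 ∈ small)

def diff_left_closed_alt (big : List Int) (small : List Int) (closed : Bool) : List Int :=
  let N : Int := big.length
  PySem.List.sorted
    (PySem.Set.ofList
      (((PySem.List.pyRange 0 N 1).filter (pvKeptB big small closed N)).map
        (fun j => PySem.List.pyGetD big j 0)))
    (fun x => x) false

-- ===== PRECONDITION & SPEC =====
def Spec_diff_left_closed (big : List Int) (small : List Int) (closed : Bool) (out : List Int) : Prop := out = diff_left_closed_alt big small closed
instance (big : List Int) (small : List Int) (closed : Bool) (out : List Int) : Decidable (Spec_diff_left_closed big small closed out) := by unfold Spec_diff_left_closed; infer_instance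

-- ===== CLAIM (what is proved, stated in full; the proofs are below) =====
def Claim_equal_diff_left_closed : Prop := ∀ (big : List Int) (small : List Int) (closed : Bool), Dom_diff_left_closed big small closed → Spec_diff_left_closed big small closed (diff_left_closed big small closed)

-- ===== LEMMAS AND PROOFS =====

-- "index j contributes to the result": j itself is kept, or (when closed) a neighbor of a kept index
def pvKeep (big small : List Int) (closed : Bool) (j : Nat) : Prop :=
  ∃ i : Nat, i < big.length ∧ ¬ big.getD i 0 ∈ small ∧
    (j = i ∨ closed = true ∧ ((0 < i ∧ j = i - 1) ∨ (i + 1 < big.length ∧ j = i + 1)))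

theorem pv_mem_foldl_iff {α : Type} (l : List α) (Q : α → Int → Prop)
    (step : List Int → α → List Int)
    (h : ∀ s a x, x ∈ step s a ↔ x ∈ s ∨ Q a x) :
    ∀ (s : List Int) (x : Int), x ∈ l.foldl step s ↔ x ∈ s ∨ ∃ a ∈ l, Q a x := by
  induction l with
  | nil => simp
  | cons a l ih =>
    intro s x
    rw [List.foldl_cons, ih, h]
    simp only [List.mem_cons]
    constructor
    · rintro ((hs | hq) | ⟨b, hb, hq⟩)
      · exact Or.inl hs
      · exact Or.inr ⟨a, Or.inl rfl, hq⟩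
      · exact Or.inr ⟨b, Or.inr hb, hq⟩
    · rintro (hs | ⟨b, (rfl | hb), hq⟩)
      · exact Or.inl (Or.inl hs)
      · exact Or.inl (Or.inr hq)
      · exact Or.inr ⟨b, hb, hq⟩

theorem pv_nodup_foldl {α : Type} (l : List α) (step : List Int → α → List Int)
    (h : ∀ s a, s.Nodup → (step s a).Nodup) :
    ∀ s : List Int, s.Nodup → (l.foldl step s).Nodup := by
  induction l with
  | nil => intro s hs; simpa using hs
  | cons a l ih => intro s hs; exact ih _ (h s a hs)

theorem pv_mem_stepA (big small : List Int) (closed : Bool) (N : Int)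
    (s : List Int) (p : Int × Int) (x : Int) :
    x ∈ pvStepA big small closed N s p ↔ x ∈ s ∨
      (¬ p.2 ∈ small ∧ (x = p.2 ∨ closed = true ∧
        ((0 < p.1 ∧ x = PySem.List.pyGetD big (p.1 - 1) 0) ∨
         (p.1 < N - 1 ∧ x = PySem.List.pyGetD big (p.1 + 1) 0)))) := by
  unfold pvStepA
  split_ifs with h1 h2 h3 h4 h5 <;>
    (try simp only [PySem.Set.mem_add]) <;> tauto

theorem pv_nodup_stepA (big small : List Int) (closed : Bool) (N : Int)
    (s : List Int) (p : Int × Int) (hs : s.Nodup) :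
    (pvStepA big small closed N s p).Nodup := by
  unfold pvStepA
  split_ifs <;> solve
  | exact hs
  | exact PySem.Set.nodup_add _ _ hs
  | exact PySem.Set.nodup_add _ _ (PySem.Set.nodup_add _ _ hs)
  | exact PySem.Set.nodup_add _ _ (PySem.Set.nodup_add _ _ (PySem.Set.nodup_add _ _ hs))

-- A's value set: exactly the values at contributing indices
theorem pv_memA (big small : List Int) (closed : Bool) (x : Int) :
    x ∈ (PySem.List.enumerate big).foldl (pvStepA big small closed big.length) [] ↔
      ∃ j : Nat, pvKeep big small closed j ∧ x = big.getD j 0 := by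
  rw [pv_mem_foldl_iff (PySem.List.enumerate big) _ _ (pv_mem_stepA big small closed big.length)]
  simp only [List.not_mem_nil, false_or]
  constructor
  · rintro ⟨p, hp, hq⟩
    rw [PySem.List.mem_enumerate_iff] at hp
    obtain ⟨k, hk, rfl⟩ := hp
    simp only [zero_add] at hq
    obtain ⟨hns, hcase⟩ := hq
    have hgk : big.getD k 0 = big[k] := List.getD_eq_getElem big 0 hk
    rcases hcase with rfl | ⟨hc, hcase⟩
    · exact ⟨k, ⟨k, hk, by rw [hgk]; exact hns, Or.inl rfl⟩, hgk.symm⟩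
    · rcases hcase with ⟨hpos, hx⟩ | ⟨hlt, hx⟩
      · refine ⟨k - 1, ⟨k, hk, by rw [hgk]; exact hns, Or.inr ⟨hc, Or.inl ⟨by exact_mod_cast hpos, rfl⟩⟩⟩, ?_⟩
        have : (k : Int) - 1 = ((k - 1 : Nat) : Int) := by omega
        rw [hx, this, PySem.List.pyGetD_natCast]
      · refine ⟨k + 1, ⟨k, hk, by rw [hgk]; exact hns, Or.inr ⟨hc, Or.inr ⟨by omega, rfl⟩⟩⟩, ?_⟩
        have : (k : Int) + 1 = ((k + 1 : Nat) : Int) := by omega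
        rw [hx, this, PySem.List.pyGetD_natCast]
  · rintro ⟨j, ⟨i, hi, hns, hcase⟩, rfl⟩
    refine ⟨((i : Int), big[i]), ?_, ?_⟩
    · rw [PySem.List.mem_enumerate_iff]; exact ⟨i, hi, by simp⟩
    · dsimp only
      have hgi : big.getD i 0 = big[i] := List.getD_eq_getElem big 0 hi
      refine ⟨by rw [← hgi]; exact hns, ?_⟩
      rcases hcase with rfl | ⟨hc, hcase⟩
      · exact Or.inl hgi
      · rcases hcase with ⟨hpos, rfl⟩ | ⟨hlt, rfl⟩
        · refine Or.inr ⟨hc, Or.inl ⟨by exact_mod_cast hpos, ?_⟩⟩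
          have : (i : Int) - 1 = ((i - 1 : Nat) : Int) := by omega
          rw [this, PySem.List.pyGetD_natCast]
        · refine Or.inr ⟨hc, Or.inr ⟨by omega, ?_⟩⟩
          have : (i : Int) + 1 = ((i + 1 : Nat) : Int) := by omega
          rw [this, PySem.List.pyGetD_natCast]

-- B's predicate agrees with pvKeep on in-range indices
theorem pv_keptB_iff (big small : List Int) (closed : Bool) (k : Nat) (hk : k < big.length) :
    pvKeptB big small closed big.length (k : Int) = true ↔ pvKeep big small closed k := by
  unfold pvKeptB pvKeep
  cases closed with
  | false =>
    simp only [if_neg Bool.false_ne_true, decide_eq_true_eq, PySem.List.pyGetD_natCast]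
    constructor
    · intro h; exact ⟨k, hk, h, Or.inl rfl⟩
    · rintro ⟨i, hi, hns, hcase⟩
      rcases hcase with rfl | ⟨hc, _⟩
      · exact hns
      · exact absurd hc (by simp)
  | true =>
    rw [if_pos rfl]
    simp only [List.any_eq_true, decide_eq_true_eq, PySem.List.mem_pyRange_one]
    constructor
    · rintro ⟨a, ⟨ha1, ha2⟩, hns⟩
      rw [max_le_iff] at ha1
      rw [lt_min_iff] at ha2
      have ha0 : 0 ≤ a := ha1.2
      obtain ⟨m, rfl⟩ : ∃ m : Nat, a = (m : Int) := ⟨a.toNat, by omega⟩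
      have hmN : m < big.length := by exact_mod_cast ha2.2
      rw [PySem.List.pyGetD_natCast] at hns
      refine ⟨m, hmN, hns, ?_⟩
      rcases show k = m ∨ (k : Int) = (m : Int) - 1 ∨ (k : Int) = (m : Int) + 1 by omega with h | h | h
      · exact Or.inl h
      · exact Or.inr ⟨by trivial, Or.inl ⟨by omega, by omega⟩⟩
      · exact Or.inr ⟨by trivial, Or.inr ⟨by omega, by omega⟩⟩
    · rintro ⟨i, hi, hns, hcase⟩
      have hw : ∃ m : Nat, m < big.length ∧ ¬ big.getD m 0 ∈ small ∧
          max ((k : Int) - 1) 0 ≤ (m : Int) ∧ (m : Int) < min ((k : Int) + 2) big.length := by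
        rcases hcase with heq | ⟨_, hcase⟩
        · exact ⟨i, hi, hns, by simp only [max_le_iff]; omega, by simp only [lt_min_iff]; omega⟩
        · rcases hcase with ⟨hpos, rfl⟩ | ⟨hlt, rfl⟩
          · exact ⟨i, hi, hns, by simp only [max_le_iff]; omega, by simp only [lt_min_iff]; omega⟩
          · exact ⟨i, hi, hns, by simp only [max_le_iff]; omega, by simp only [lt_min_iff]; omega⟩
      obtain ⟨m, _, hns', h1, h2⟩ := hw
      exact ⟨(m : Int), ⟨h1, h2⟩, by rw [PySem.List.pyGetD_natCast]; exact hns'⟩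

-- B's selected-value list: exactly the values at contributing indices
theorem pv_memB (big small : List Int) (closed : Bool) (x : Int) :
    x ∈ ((PySem.List.pyRange 0 (big.length : Int) 1).filter
          (pvKeptB big small closed (big.length : Int))).map
        (fun j => PySem.List.pyGetD big j 0) ↔
      ∃ j : Nat, pvKeep big small closed j ∧ x = big.getD j 0 := by
  simp only [List.mem_map, List.mem_filter, PySem.List.mem_pyRange_one]
  constructor
  · rintro ⟨a, ⟨⟨ha0, haN⟩, hkept⟩, rfl⟩
    obtain ⟨k, rfl⟩ : ∃ k : Nat, a = (k : Int) := ⟨a.toNat, by omega⟩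
    have hk : k < big.length := by exact_mod_cast haN
    rw [pv_keptB_iff big small closed k hk] at hkept
    exact ⟨k, hkept, PySem.List.pyGetD_natCast big k 0⟩
  · rintro ⟨j, hj, rfl⟩
    have hjN : j < big.length := by
      obtain ⟨i, hi, _, hcase⟩ := hj
      rcases hcase with rfl | ⟨_, hcase⟩
      · exact hi
      · rcases hcase with ⟨_, rfl⟩ | ⟨hlt, rfl⟩ <;> omega
    refine ⟨(j : Int), ⟨⟨by omega, by exact_mod_cast hjN⟩, ?_⟩, PySem.List.pyGetD_natCast big j 0⟩
    exact (pv_keptB_iff big small closed j hjN).mpr hj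

-- ===== VERDICT (by name: the statement is the Claim_ definition above) =====
theorem diff_left_closed_spec : Claim_equal_diff_left_closed := by
  intro big small closed _
  unfold Spec_diff_left_closed diff_left_closed diff_left_closed_alt
  apply PySem.List.sorted_eq_sorted_of_perm _ _ _ (fun a b h => h)
  rw [List.perm_ext_iff_of_nodup
    (pv_nodup_foldl _ _ (pv_nodup_stepA big small closed big.length) [] List.nodup_nil)
    (PySem.Set.nodup_ofList _)]
  intro x
  rw [pv_memA, PySem.Set.mem_ofList, pv_memB]
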